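-- pv_equiv track=rewrite | github.com/ohsu-comp-bio/compbio-galaxy-wrappers | gatk_cnv_annotate/gatk4_cnv_annotate.py | codon_map
-- ===== SOURCE A (Python) =====
-- def codon_map(my_cds):
--     """
--
--     :param my_cds:
--     :return:
--     """
--     codon_map = {}
--     j = 1
--     k = 1
--     for entry in my_cds:
--         for i in range(entry[0], entry[1]+1):
--             codon_map[i] = j
--             if k == 3:
--                 k = 1
--                 j += 1
--             else:
--                 k += 1
--     return codon_map
-- ===== SOURCE B (Python) =====
-- def codon_map(my_cds):
--     # Stage 1: flatten the intervals into one position stream.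
--     stream = []
--     for lo, hi in my_cds:
--         stream.extend(range(lo, hi + 1))
--     # Stage 2: consume the stream codon by codon, three positions at a time;
--     # the codon number is per-chunk state, no per-position counter at all.
--     cm = {}
--     codon = 1
--     start = 0
--     while start < len(stream):
--         for i in stream[start:start + 3]:
--             cm[i] = codon
--         codon += 1
--         start += 3
--     return cm
-- ===== Notes on version B (the rewrite author's own statement) =====
-- stated objective: alternative
-- what changed: Instead of A's per-position state machine (cyclic counter k and codon number j updated on every position), B first flattens the intervals into one position stream and then consumes it in chunks of three, assigning one codon number per chunk.
import Mathlib
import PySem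

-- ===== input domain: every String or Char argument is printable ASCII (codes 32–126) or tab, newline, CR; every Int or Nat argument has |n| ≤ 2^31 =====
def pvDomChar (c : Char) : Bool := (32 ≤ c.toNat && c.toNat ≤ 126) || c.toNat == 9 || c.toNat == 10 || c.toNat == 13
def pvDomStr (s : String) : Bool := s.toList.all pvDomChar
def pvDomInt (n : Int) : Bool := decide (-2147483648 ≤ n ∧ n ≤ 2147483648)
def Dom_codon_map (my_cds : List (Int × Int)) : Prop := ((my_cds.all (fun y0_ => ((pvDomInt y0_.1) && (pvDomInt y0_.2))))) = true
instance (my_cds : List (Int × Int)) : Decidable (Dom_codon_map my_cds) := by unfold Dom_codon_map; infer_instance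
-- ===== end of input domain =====

-- B replaces A's per-position state machine (cyclic k, codon number j) by flattening the
-- intervals into one position stream and consuming it in chunks of three, one codon number
-- per chunk; objective: alternative decomposition, same cost.

-- ===== PORT A =====
-- body of A's inner loop: codon_map[i] = j; then the if k == 3 branch (state: dict, j, k)
def stepA_cm (st : PySem.Dict Int Int × Int × Int) (i : Int) : PySem.Dict Int Int × Int × Int :=
  let d := st.1.insert i st.2.1
  if st.2.2 == 3 then (d, st.2.1 + 1, 1) else (d, st.2.1, st.2.2 + 1)

def codon_map (my_cds : List (Int × Int)) : List (Int × Int) :=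
  (my_cds.foldl
    (fun st entry => (PySem.List.pyRange entry.1 (entry.2 + 1) 1).foldl stepA_cm st)
    (PySem.Dict.empty, 1, 1)).1.items

-- ===== PORT B =====
-- B's while loop over the chunk start index; stream[start:start+3] is PySem.List.slice
def bLoop (stream : List Int) (codon start : Int) (cm : PySem.Dict Int Int) : PySem.Dict Int Int :=
  if start < (stream.length : Int) then
    bLoop stream (codon + 1) (start + 3)
      ((PySem.List.slice stream (some start) (some (start + 3))).foldl
        (fun d i => d.insert i codon) cm)
  else cm
termination_by ((stream.length : Int) - start).toNat
decreasing_by omega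

def codon_map_alt (my_cds : List (Int × Int)) : List (Int × Int) :=
  let stream := my_cds.flatMap (fun entry => PySem.List.pyRange entry.1 (entry.2 + 1) 1)
  (bLoop stream 1 0 PySem.Dict.empty).items

-- ===== PRECONDITION & SPEC =====
def Spec_codon_map (my_cds : List (Int × Int)) (out : List (Int × Int)) : Prop := out = codon_map_alt my_cds
instance (my_cds : List (Int × Int)) (out : List (Int × Int)) : Decidable (Spec_codon_map my_cds out) := by unfold Spec_codon_map; infer_instance

-- ===== CLAIM (what is proved, stated in full; the proofs are below) =====
def Claim_equal_codon_map : Prop := ∀ (my_cds : List (Int × Int)), Dom_codon_map my_cds → Spec_codon_map my_cds (codon_map my_cds)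

-- ===== LEMMAS AND PROOFS =====

-- proof-side description of both loops: consume the list in chunks of three,
-- one codon number per chunk
def chunkLoop (stream : List Int) (codon : Int) (cm : PySem.Dict Int Int) : PySem.Dict Int Int :=
  match stream with
  | [] => cm
  | x :: rest =>
      chunkLoop ((x :: rest).drop 3) (codon + 1)
        (((x :: rest).take 3).foldl (fun d i => d.insert i codon) cm)
termination_by stream.length
decreasing_by simp [List.length_drop]

theorem chunkLoop_ne_nil (l : List Int) (c : Int) (d : PySem.Dict Int Int) (h : l ≠ []) :
    chunkLoop l c d = chunkLoop (l.drop 3) (c + 1) ((l.take 3).foldl (fun d i => d.insert i c) d) := by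
  cases l with
  | nil => exact absurd rfl h
  | cons x rest => rw [chunkLoop]

-- A's fold over any position list, started at the beginning of codon c (k = 1),
-- builds the same dict as the chunk-of-three consumption starting at codon c
theorem foldA_eq_chunk : ∀ (l : List Int) (d : PySem.Dict Int Int) (c : Int),
    (l.foldl stepA_cm (d, c, 1)).1 = chunkLoop l c d
  | [], d, c => by simp [chunkLoop]
  | [x], d, c => by
      simp [chunkLoop, stepA_cm]
  | [x, y], d, c => by
      simp [chunkLoop, stepA_cm]
  | x :: y :: z :: rest, d, c => by
      have h1 : stepA_cm (d, c, 1) x = (d.insert x c, c, 2) := by simp [stepA_cm]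
      have h2 : stepA_cm (d.insert x c, c, 2) y = ((d.insert x c).insert y c, c, 3) := by
        simp [stepA_cm]
      have h3 : stepA_cm ((d.insert x c).insert y c, c, 3) z
          = (((d.insert x c).insert y c).insert z c, c + 1, 1) := by simp [stepA_cm]
      simp only [List.foldl_cons, h1, h2, h3]
      rw [foldA_eq_chunk rest]
      simp [chunkLoop]
termination_by l => l.length

-- B's index-driven while loop at start index k computes the chunk consumption
-- of the remaining suffix stream.drop k
theorem bLoop_eq_chunk (s : List Int) : ∀ (k : Nat) (c : Int) (d : PySem.Dict Int Int),
    bLoop s c (k : Int) d = chunkLoop (s.drop k) c d := by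
  intro k
  induction hn : s.length - k using Nat.strong_induction_on generalizing k with
  | _ n ih =>
    intro c d
    rw [bLoop]
    split_ifs with h
    · have hk : k < s.length := by omega
      have hcast : ((k : Int) + 3) = ((k + 3 : Nat) : Int) := by push_cast; ring
      have hslice : PySem.List.slice s (some (k : Int)) (some ((k : Int) + 3))
          = (s.drop k).take 3 := by
        have := PySem.List.slice_natCast_add (xs := s) (j := k) (n := 3)
        simpa using this
      have hne : s.drop k ≠ [] := by
        intro hcon
        have hlen := congrArg List.length hcon
        simp at hlen
        omega
      rw [hslice, hcast, ih (s.length - (k + 3)) (by omega) (k + 3) rfl]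
      conv_rhs => rw [chunkLoop_ne_nil (s.drop k) c d hne]
      rw [List.drop_drop]
    · have hk : s.length ≤ k := by omega
      rw [List.drop_eq_nil_of_le hk, chunkLoop]

-- ===== VERDICT (by name: the statement is the Claim_ definition above) =====
theorem codon_map_spec : Claim_equal_codon_map := by
  intro my_cds _
  unfold Spec_codon_map codon_map codon_map_alt
  have hflat :
      List.foldl (fun st entry => List.foldl stepA_cm st (PySem.List.pyRange entry.1 (entry.2 + 1) 1))
        (PySem.Dict.empty, 1, 1) my_cds
      = List.foldl stepA_cm (PySem.Dict.empty, 1, 1)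
          (my_cds.flatMap (fun entry => PySem.List.pyRange entry.1 (entry.2 + 1) 1)) :=
    (List.foldl_flatMap).symm
  rw [hflat, foldA_eq_chunk]
  have h0 := bLoop_eq_chunk
    (my_cds.flatMap (fun entry => PySem.List.pyRange entry.1 (entry.2 + 1) 1)) 0 1 PySem.Dict.empty
  simp only [Nat.cast_zero, List.drop_zero] at h0
  rw [← h0]
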